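-- pv_equiv track=rewrite | github.com/OuJunLin/function-ex- | 萬年曆.py | yearToDates
-- ===== SOURCE A (Python) =====
-- def checkYear(year):
--     if year%400 == 0:
--         return True
--     elif year%100 == 0:
--         return False
--     elif year%4 == 0:
--         return True
--     else:
--         return False
--
-- def yearToDates(year):
--     sum1 = 0
--     for i in range(1, year):
--         if checkYear(i):
--             sum1 += 366
--         else:
--             sum1 += 365
--
--     return sum1
-- ===== SOURCE B (Python) =====
-- def yearToDates(year):
--     n = max(year - 1, 0)
--     return 365 * n + n // 4 - n // 100 + n // 400
-- ===== Notes on version B (the rewrite author's own statement) =====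
-- stated objective: faster
-- what changed: Replaces the per-year loop summing day counts with a closed-form expression: days-per-year times the year count plus the Gregorian leap-year count obtained by floor divisions.
import Mathlib
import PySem

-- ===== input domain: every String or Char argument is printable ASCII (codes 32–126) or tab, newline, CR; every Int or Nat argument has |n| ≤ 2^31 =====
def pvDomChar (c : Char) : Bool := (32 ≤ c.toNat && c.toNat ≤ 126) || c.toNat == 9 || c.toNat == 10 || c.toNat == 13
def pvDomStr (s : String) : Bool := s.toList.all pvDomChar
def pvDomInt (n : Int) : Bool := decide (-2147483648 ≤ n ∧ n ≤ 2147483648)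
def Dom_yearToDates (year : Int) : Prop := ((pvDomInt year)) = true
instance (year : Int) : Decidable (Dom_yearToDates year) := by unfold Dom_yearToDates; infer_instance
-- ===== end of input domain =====

-- B replaces A's per-year summing loop with a constant-time closed-form Gregorian leap-year count; return values proved equal for all Int year.

-- ===== PORT A =====
def checkYear (year : Int) : Bool :=
  if PySem.Int.mod year 400 = 0 then true
  else if PySem.Int.mod year 100 = 0 then false
  else if PySem.Int.mod year 4 = 0 then true
  else false

def yearToDates (year : Int) : Int :=
  (PySem.List.pyRange 1 year 1).foldl
    (fun sum1 i => if checkYear i then sum1 + 366 else sum1 + 365) 0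

-- ===== PORT B =====
def yearToDates_alt (year : Int) : Int :=
  let n := max (year - 1) 0
  365 * n + PySem.Int.floordiv n 4 - PySem.Int.floordiv n 100 + PySem.Int.floordiv n 400

-- ===== PRECONDITION & SPEC =====
def Spec_yearToDates (year : Int) (out : Int) : Prop := out = yearToDates_alt year
instance (year : Int) (out : Int) : Decidable (Spec_yearToDates year out) := by unfold Spec_yearToDates; infer_instance

-- ===== CLAIM (what is proved, stated in full; the proofs are below) =====
def Claim_equal_yearToDates : Prop := ∀ (year : Int), Dom_yearToDates year → Spec_yearToDates year (yearToDates year)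

-- ===== LEMMAS AND PROOFS =====

theorem yearToDates_aux (n : Nat) :
    (PySem.List.pyRange 1 (1 + (n : Int)) 1).foldl
      (fun sum1 i => if checkYear i then sum1 + 366 else sum1 + 365) 0
    = 365 * (n : Int) + (n : Int) / 4 - (n : Int) / 100 + (n : Int) / 400 := by
  induction n with
  | zero =>
    rw [show (1 : Int) + ((0 : Nat) : Int) = 1 by norm_num,
       PySem.List.pyRange_one_eq_nil (by omega)]
    norm_num
  | succ k ih =>
    have h1 : (1 : Int) + ((k + 1 : Nat) : Int) = (1 + (k : Int)) + 1 := by push_cast; ring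
    rw [h1, PySem.List.pyRange_one_succ_right (by omega), List.foldl_append, ih]
    have e : (1 : Int) + (k : Int) = (k : Int) + 1 := by ring
    rw [e]
    simp only [List.foldl, checkYear, PySem.Int.mod_eq_emod_of_pos (by omega : (0:Int) < 400),
      PySem.Int.mod_eq_emod_of_pos (by omega : (0:Int) < 100),
      PySem.Int.mod_eq_emod_of_pos (by omega : (0:Int) < 4)]
    split_ifs
    all_goals (try simp_all)
    all_goals omega

theorem yearToDates_spec : Claim_equal_yearToDates := by
  intro year _
  unfold Spec_yearToDates yearToDates
  simp only [yearToDates_alt]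
  by_cases h : year ≤ 1
  · rw [PySem.List.pyRange_one_eq_nil h]
    simp only [List.foldl_nil]
    have : max (year - 1) 0 = 0 := by omega
    rw [this]
    simp [PySem.Int.floordiv]
  · have hn : year = 1 + ((year - 1).toNat : Int) := by omega
    have hmax : max (year - 1) 0 = ((year - 1).toNat : Int) := by omega
    rw [hmax]
    conv_lhs => rw [hn]
    rw [yearToDates_aux]
    rw [PySem.Int.floordiv_eq_ediv_of_pos (by omega),
        PySem.Int.floordiv_eq_ediv_of_pos (by omega),
        PySem.Int.floordiv_eq_ediv_of_pos (by omega)]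
-- ===== VERDICT is the theorem above =====
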